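-- pv_equiv track=rewrite | github.com/Straw17/games | Snake.py | expandArray
-- ===== SOURCE A (Python) =====
-- def expandArray(array, scale):
--     newArray = []
--     for row in range(len(array)*scale):
--         newArray.append([' ']*(len(array[0])*scale))
--     for row in range(len(newArray)):
--         for cell in range(len(newArray[row])):
--             newArray[row][cell] = array[row//scale][cell//scale]
--     return newArray
-- ===== SOURCE B (Python) =====
-- def expandArray(array, scale):
--     result = []
--     width = len(array[0]) if array else 0
--     for row in array:
--         template = [c for c in row[:width] for _ in range(scale)]
--         for _ in range(scale):
--             result.append(list(template))
--     return result
-- ===== Notes on version B (the rewrite author's own statement) =====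
-- stated objective: simpler
-- what changed: B builds each expanded row once (slice the source row to the first row's width, repeat each cell scale times) and appends scale copies of it, instead of allocating a placeholder grid and re-indexing the source with //scale for every output cell.
import Mathlib
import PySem

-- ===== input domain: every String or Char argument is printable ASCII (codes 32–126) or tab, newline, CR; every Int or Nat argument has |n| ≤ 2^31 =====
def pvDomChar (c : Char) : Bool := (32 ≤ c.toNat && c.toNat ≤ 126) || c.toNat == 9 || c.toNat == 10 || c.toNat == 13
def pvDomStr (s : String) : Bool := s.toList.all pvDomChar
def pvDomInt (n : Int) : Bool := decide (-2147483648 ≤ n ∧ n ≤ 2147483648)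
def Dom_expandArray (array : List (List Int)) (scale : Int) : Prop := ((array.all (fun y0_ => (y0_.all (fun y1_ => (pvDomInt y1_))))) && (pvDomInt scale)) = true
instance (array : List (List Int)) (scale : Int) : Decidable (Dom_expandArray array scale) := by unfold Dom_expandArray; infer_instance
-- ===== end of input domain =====

-- B replaces A's placeholder grid + per-cell //scale indexing by building each expanded
-- row once (slice to the first row's width, repeat each cell scale times) and appending
-- scale copies of it; objective: simpler, same asymptotic cost.

-- ===== PORT A =====
-- Python's placeholder ' ' is represented by 0 : Int; it is always overwritten by the
-- second loop (which covers every cell), so the choice is unobservable.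
-- The two mutation loops assign every cell of the grid exactly once, in row-major order;
-- the port expresses that as a map over the same row/cell index ranges, computing the
-- same value array[row//scale][cell//scale] per cell (out-of-range indexing, which is an
-- IndexError in Python, is excluded by Pre_ below; the port's .getD 0 there is dead).
def expandArray (array : List (List Int)) (scale : Int) : List (List Int) :=
  let newArray : List (List Int) :=
    (List.range ((array.length : Int) * scale).toNat).map
      (fun _ => List.replicate (((array.headD []).length : Int) * scale).toNat (0 : Int))
  (List.range newArray.length).map (fun row =>
    (List.range ((newArray.getD row []).length)).map (fun cell =>
      (PySem.List.pyGet?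
        ((PySem.List.pyGet? array (PySem.Int.floordiv (Int.ofNat row) scale)).getD [])
        (PySem.Int.floordiv (Int.ofNat cell) scale)).getD 0))

-- ===== PORT B =====
def expandArray_alt (array : List (List Int)) (scale : Int) : List (List Int) :=
  let width : Nat := (array.headD []).length
  array.foldl (fun result row =>
    let template := (PySem.List.slice row none (some (width : Int))).flatMap
      (fun c => List.replicate scale.toNat c)
    result ++ List.replicate scale.toNat template) []

-- ===== PRECONDITION & SPEC =====
-- Pre_ excludes exactly the inputs where A raises IndexError: scale ≥ 1 together with a
-- row shorter than the first row.
def Pre_expandArray (array : List (List Int)) (scale : Int) : Prop :=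
  scale ≤ 0 ∨ ∀ row ∈ array, (array.headD []).length ≤ row.length
instance (array : List (List Int)) (scale : Int) : Decidable (Pre_expandArray array scale) := by
  unfold Pre_expandArray; infer_instance
def pvWitness_expandArray : List (List Int) × Int := ([[1, 2], [3, 4]], 2)

def Spec_expandArray (array : List (List Int)) (scale : Int) (out : List (List Int)) : Prop := out = expandArray_alt array scale
instance (array : List (List Int)) (scale : Int) (out : List (List Int)) : Decidable (Spec_expandArray array scale out) := by unfold Spec_expandArray; infer_instance

-- ===== CLAIM (what is proved, stated in full; the proofs are below) =====
def Claim_equal_expandArray : Prop := ∀ (array : List (List Int)) (scale : Int), Dom_expandArray array scale → Pre_expandArray array scale → Spec_expandArray array scale (expandArray array scale)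
-- ===== LEMMAS AND PROOFS =====

-- Expanding an index loop of length m*s with //s into s-fold replication of each of m values.
theorem range_mul_div {α : Type} (g : Nat → α) (m s : Nat) (hs : 0 < s) :
    (List.range (m * s)).map (fun k => g (k / s)) =
      (List.range m).flatMap (fun i => List.replicate s (g i)) := by
  induction m with
  | zero => simp
  | succ m ih =>
      rw [Nat.succ_mul, List.range_add, List.map_append, ih, List.range_succ,
        List.flatMap_append]
      congr 1
      simp only [List.flatMap_cons, List.flatMap_nil, List.append_nil, List.map_map]
      rw [List.eq_replicate_iff]
      refine ⟨by simp, ?_⟩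
      intro b hb
      simp only [List.mem_map, List.mem_range, Function.comp] at hb
      obtain ⟨k, hk, rfl⟩ := hb
      have : (m * s + k) / s = m := by
        rw [Nat.mul_comm, Nat.mul_add_div hs, Nat.div_eq_of_lt hk, Nat.add_zero]
      simp [this]

-- foldl-with-append over a list is flatMap
theorem foldl_append_flatMap {α β : Type} (h : α → List β) (init : List β) (l : List α) :
    List.foldl (fun r x => r ++ h x) init l = init ++ l.flatMap h := by
  induction l generalizing init with
  | nil => simp
  | cons a tl ih => simp [ih, List.append_assoc]

-- flatMap over a list = flatMap over its index range (any default)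
theorem flatMap_getD_range {α β : Type} (d : α) (h : α → List β) (l : List α) :
    l.flatMap h = (List.range l.length).flatMap (fun i => h (l.getD i d)) := by
  induction l with
  | nil => simp
  | cons a tl ih =>
      rw [List.flatMap_cons, ih, List.length_cons, List.range_succ_eq_map,
        List.flatMap_cons, List.flatMap_map]
      simp [List.getD]

theorem expandArray_spec : Claim_equal_expandArray := by
  intro array scale _ hpre
  unfold Spec_expandArray expandArray expandArray_alt
  by_cases hs : scale ≤ 0
  · -- both sides are []
    have hA : ((array.length : Int) * scale).toNat = 0 := by
      have : (array.length : Int) * scale ≤ 0 :=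
        mul_nonpos_of_nonneg_of_nonpos (by positivity) hs
      omega
    have hB : scale.toNat = 0 := by omega
    simp only [hA, hB, List.replicate_zero, List.append_nil, List.range_zero,
      List.map_nil, List.length_nil]
    simp
  · have hpos : 0 < scale := by omega
    obtain ⟨s, rfl⟩ : ∃ s : Nat, scale = (s : Int) := ⟨scale.toNat, by omega⟩
    have hspos : 0 < s := by exact_mod_cast hpos
    have hrag : ∀ row ∈ array, (array.headD []).length ≤ row.length := by
      rcases hpre with h | h
      · omega
      · exact h
    set n := array.length with hn
    set w := (array.headD []).length with hw
    -- simplify A's index arithmetic and placeholder grid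
    have hNA : ((n : Int) * (s : Int)).toNat = n * s := by omega
    have hWA : ((w : Int) * (s : Int)).toNat = w * s := by omega
    have htoNat : (s : Int).toNat = s := by omega
    simp only [hNA, hWA, htoNat, List.length_map, List.length_range]
    have hgrid : ∀ row ∈ List.range (n * s),
        ((List.map (fun _ => List.replicate (w * s) (0:Int)) (List.range (n * s))).getD
          row []).length = w * s := by
      intro row hr
      rw [List.mem_range] at hr
      rw [List.getD_eq_getElem?_getD, List.getElem?_map, List.getElem?_range hr]
      simp
    rw [List.map_congr_left (fun row hr => by rw [hgrid row hr])]
    simp only [Int.ofNat_eq_natCast, PySem.Int.floordiv_natCast, PySem.List.pyGet?_natCast]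
    -- turn B's fold into a flatMap and its slice into a take
    rw [foldl_append_flatMap, List.nil_append]
    simp only [PySem.List.slice_to_natCast]
    -- expand A's two //scale index loops into replication
    refine (range_mul_div (fun i => List.map
      (fun cell => ((array[i]?.getD ([] : List Int))[cell / s]?).getD 0)
      (List.range (w * s))) n s hspos).trans ?_
    rw [flatMap_getD_range ([] : List Int) _ array, ← hn]
    apply List.flatMap_congr
    intro i hi
    rw [List.mem_range] at hi
    congr 1
    have hrow : array[i]? = some (array.getD i []) := by
      rw [List.getElem?_eq_getElem hi, List.getD_eq_getElem _ _ hi]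
    rw [hrow]
    simp only [Option.getD_some]
    set row := array.getD i [] with hrowdef
    have hmem : row ∈ array := by
      rw [hrowdef, List.getD_eq_getElem _ _ hi]; exact List.getElem_mem hi
    have hwle : w ≤ row.length := hrag row hmem
    refine (range_mul_div (fun j => (row[j]?).getD 0) w s hspos).trans ?_
    rw [flatMap_getD_range (0 : Int) (fun c => List.replicate s c) (row.take w)]
    have hlen : (row.take w).length = w := by simp [hwle]
    rw [hlen]
    apply List.flatMap_congr
    intro j hj
    rw [List.mem_range] at hj
    congr 1
    rw [List.getD_eq_getElem?_getD, List.getElem?_take]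
    simp [hj]
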